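-- pv_equiv track=rewrite | github.com/waliwali777/paddle_test | paddle/phi/kernels/fusion/cutlass/cutlass_kernels/fpA_intB_gemm/generic_mixed_gemm_kernelLauncher.py | find_arch_range
-- ===== SOURCE A (Python) =====
-- def find_arch_range(archs):
--     compile_archs = []
--     for arch in archs:
--         if arch >= 70 and arch < 75:
--             compile_archs.append(70)
--         elif arch >= 75 and arch < 80:
--             compile_archs.append(75)
--         elif arch >= 80 and arch < 90:
--             compile_archs.append(80)
--     compile_archs = list(set(compile_archs))
--     compile_archs.sort()
--     return compile_archs
-- ===== SOURCE B (Python) =====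
-- def _bisect_right(a, x):
--     lo, hi = 0, len(a)
--     while lo < hi:
--         mid = (lo + hi) // 2
--         if x < a[mid]:
--             hi = mid
--         else:
--             lo = mid + 1
--     return lo
--
--
-- def find_arch_range(archs):
--     boundaries = [70, 75, 80, 90]
--     buckets = [70, 75, 80]
--     found = set()
--     for arch in archs:
--         if 70 <= arch < 90:
--             found.add(buckets[_bisect_right(boundaries, arch) - 1])
--     return sorted(found)
-- ===== Notes on version B (the rewrite author's own statement) =====
-- stated objective: idiomatic
-- what changed: Replaces the if/elif comparison ladder with a table-driven binary search (hand-written bisect_right) over a sorted table of the range boundaries, adding buckets directly into a set and returning sorted(set) instead of append-then-dedup-then-sort.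
import Mathlib
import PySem

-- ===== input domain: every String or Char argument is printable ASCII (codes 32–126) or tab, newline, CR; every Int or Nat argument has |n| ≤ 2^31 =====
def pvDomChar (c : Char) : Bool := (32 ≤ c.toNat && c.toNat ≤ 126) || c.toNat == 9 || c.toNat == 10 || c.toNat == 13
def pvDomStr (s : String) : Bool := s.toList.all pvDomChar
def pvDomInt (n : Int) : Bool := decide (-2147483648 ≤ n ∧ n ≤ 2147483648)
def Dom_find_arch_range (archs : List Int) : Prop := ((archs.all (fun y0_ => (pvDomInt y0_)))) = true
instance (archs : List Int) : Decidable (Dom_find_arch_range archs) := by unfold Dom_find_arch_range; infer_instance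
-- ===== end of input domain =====

-- B replaces A's if/elif ladder with a binary search over a sorted boundary table, adding buckets straight into a set (idiomatic; same cost).


-- ===== PORT A =====
def find_arch_range (archs : List Int) : List Int :=
  let compile_archs : List Int := archs.foldl (fun acc arch =>
    if 70 ≤ arch ∧ arch < 75 then acc ++ [70]
    else if 75 ≤ arch ∧ arch < 80 then acc ++ [75]
    else if 80 ≤ arch ∧ arch < 90 then acc ++ [80]
    else acc) []
  -- list(set(...)) followed by .sort(): the unspecified set order is erased by the sort
  PySem.List.sorted (PySem.Set.ofList compile_archs) (fun x => x) false

-- ===== PORT B =====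
-- hand-written bisect_right loop from Source B; the while loop is ported as structural recursion on
-- the iteration bound hi - lo (the interval length strictly shrinks each iteration, so the bound
-- is never exhausted while lo < hi); a[mid] is always in range here, ported as getD
def pvBisectGo (a : List Int) (x : Int) : Nat → Nat → Nat → Nat
  | 0, lo, _hi => lo
  | fuel + 1, lo, hi =>
    if lo < hi then
      let mid := (lo + hi) / 2
      if x < a.getD mid 0 then pvBisectGo a x fuel lo mid
      else pvBisectGo a x fuel (mid + 1) hi
    else lo

def pvBisect (a : List Int) (x : Int) (lo hi : Nat) : Nat := pvBisectGo a x (hi - lo) lo hi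

def find_arch_range_alt (archs : List Int) : List Int :=
  let boundaries : List Int := [70, 75, 80, 90]
  let buckets : List Int := [70, 75, 80]
  let found : PySem.Set Int := archs.foldl (fun s arch =>
    if 70 ≤ arch ∧ arch < 90 then
      PySem.Set.add s (buckets.getD (pvBisect boundaries arch 0 boundaries.length - 1) 0)
    else s) PySem.Set.empty
  PySem.List.sorted found (fun x => x) false

-- ===== PRECONDITION & SPEC =====
def Spec_find_arch_range (archs : List Int) (out : List Int) : Prop := out = find_arch_range_alt archs
instance (archs : List Int) (out : List Int) : Decidable (Spec_find_arch_range archs out) := by unfold Spec_find_arch_range; infer_instance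

-- ===== CLAIM (what is proved, stated in full; the proofs are below) =====
def Claim_equal_find_arch_range : Prop := ∀ (archs : List Int), Dom_find_arch_range archs → Spec_find_arch_range archs (find_arch_range archs)

-- ===== LEMMAS AND PROOFS =====

theorem pvBisect_spec (x : Int) (h1 : 70 ≤ x) (h2 : x < 90) :
    pvBisect [70, 75, 80, 90] x 0 4 = if x < 75 then 1 else if x < 80 then 2 else 3 := by
  simp only [pvBisect]
  norm_num [pvBisectGo, List.getD]
  split_ifs <;> omega

theorem fold_agree (archs : List Int) (acc : List Int) (s : PySem.Set Int) :
    ((archs.foldl (fun acc arch =>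
      if 70 ≤ arch ∧ arch < 75 then acc ++ [(70 : Int)]
      else if 75 ≤ arch ∧ arch < 80 then acc ++ [75]
      else if 80 ≤ arch ∧ arch < 90 then acc ++ [80]
      else acc) acc).foldl PySem.Set.add s)
    = archs.foldl (fun s arch =>
        if 70 ≤ arch ∧ arch < 90 then
          PySem.Set.add s ([(70 : Int), 75, 80].getD (pvBisect [70, 75, 80, 90] arch 0 4 - 1) 0)
        else s) (acc.foldl PySem.Set.add s) := by
  induction archs generalizing acc s with
  | nil => rfl
  | cons a t ih =>
    simp only [List.foldl_cons]
    rw [ih]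
    congr 1
    by_cases h : 70 ≤ a ∧ a < 90
    · rw [pvBisect_spec a h.1 h.2]
      by_cases c1 : a < 75
      · simp [h.1, h.2, c1, List.getD, List.foldl_append]
      · by_cases c2 : a < 80
        · simp [h, c1, c2, List.getD, List.foldl_append, show (75:Int) ≤ a by omega]
        · simp [h, c1, c2, List.getD, List.foldl_append,
            show ¬ (70 ≤ a ∧ a < 75) by omega, show ¬ (75 ≤ a ∧ a < 80) by omega,
            show (80:Int) ≤ a by omega]
    · simp [h, show ¬ (70 ≤ a ∧ a < 75) by omega, show ¬ (75 ≤ a ∧ a < 80) by omega,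
        show ¬ (80 ≤ a ∧ a < 90) by omega]

-- ===== VERDICT (by name: the statement is the Claim_ definition above) =====
theorem find_arch_range_spec : Claim_equal_find_arch_range := by
  intro archs _
  unfold Spec_find_arch_range find_arch_range find_arch_range_alt
  simp only [PySem.Set.ofList_eq_foldl, List.length_cons, List.length_nil]
  rw [fold_agree archs [] []]
  rfl
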